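-- pv_equiv track=rewrite | github.com/Aguilera450/RdC | Calculadora-VLSM/VLSM.py | ultimo_octeto
-- ===== SOURCE A (Python) =====
-- def ultimo_octeto(lista_m):
--     # :param: lista_m es la sub-máscara para cada subred.
--     lista_ultimo_octeto = []
--     for x in lista_m:
--         sum = 0
--         if x > 24 and x <= 32:
--             for i in range(7, 7 - (x - 24), -1):
--                 sum += pow(2, i)
--             lista_ultimo_octeto.append(sum)
--         elif x > 16:
--             for i in range(7, 7 - (x - 16), -1):
--                 sum += pow(2, i)
--             lista_ultimo_octeto.append(sum)
--         elif x > 8: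
--             for i in range(7, 7 - (x - 8), -1):
--                 sum += pow(2, i)
--             lista_ultimo_octeto.append(sum)
--         elif x >= 0:
--             for i in range(7, 7 - x, -1):
--                 sum += pow(2, i)
--             lista_ultimo_octeto.append(sum)
--     return lista_ultimo_octeto
-- ===== SOURCE B (Python) =====
-- def ultimo_octeto(lista_m):
--     # Closed form: a /x mask fills b = 1..8 top bits of its partially-filled
--     # octet (b = 0 for an octet boundary), whose value is 256 - (256 >> b).
--     return [256 - (256 >> (((x - 1) % 8) + 1 if x > 0 else 0))
--             for x in lista_m if 0 <= x <= 32]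
-- ===== Notes on version B (the rewrite author's own statement) =====
-- stated objective: simpler
-- what changed: Replaces the four-way octet branch with power-summing inner loops by a single list comprehension using the closed form 256 - (256 >> b) with b = ((x-1) % 8) + 1 (0 for x = 0), appending exactly for 0 <= x <= 32.
-- outside the precondition, e.g. on ultimo_octeto([33]): A returns [255.998046875], B returns []
import Mathlib
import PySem

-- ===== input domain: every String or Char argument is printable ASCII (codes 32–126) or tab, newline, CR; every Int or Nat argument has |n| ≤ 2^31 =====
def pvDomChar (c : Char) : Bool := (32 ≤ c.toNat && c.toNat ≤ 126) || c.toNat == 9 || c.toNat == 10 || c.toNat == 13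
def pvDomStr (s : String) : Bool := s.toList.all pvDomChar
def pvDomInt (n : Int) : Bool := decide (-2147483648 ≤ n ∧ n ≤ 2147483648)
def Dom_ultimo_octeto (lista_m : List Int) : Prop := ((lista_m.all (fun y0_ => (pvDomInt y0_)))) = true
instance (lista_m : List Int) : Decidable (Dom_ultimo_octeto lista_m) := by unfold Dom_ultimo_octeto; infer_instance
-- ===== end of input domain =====

-- B replaces A's four branch-selected power-summing inner loops by one list
-- comprehension with the closed form 256 - (256 >> b); objective: simpler.


-- ===== PORT A =====
-- pow(2, i): exact for i ≥ 0; Pre_ keeps every loop index nonnegative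
-- (a negative i would make Python's pow return a float)
def pyPow2 (i : Int) : Int := if 0 ≤ i then 2 ^ i.toNat else 0

-- 'sum = 0; for i in range(7, 7 - b, -1): sum += pow(2, i)'
def octetoSum (b : Int) : Int :=
  (PySem.List.pyRange 7 (7 - b) (-1)).foldl (fun s i => s + pyPow2 i) 0

-- the body of A's 'for x in lista_m' loop
def octetoStep (acc : List Int) (x : Int) : List Int :=
  if x > 24 ∧ x ≤ 32 then acc ++ [octetoSum (x - 24)]
  else if x > 16 then acc ++ [octetoSum (x - 16)]
  else if x > 8 then acc ++ [octetoSum (x - 8)]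
  else if x ≥ 0 then acc ++ [octetoSum x]
  else acc

def ultimo_octeto (lista_m : List Int) : List Int :=
  lista_m.foldl octetoStep []

-- ===== PORT B =====
-- Python '>>' for a nonnegative shift amount
def pyShr (a b : Int) : Int := a / 2 ^ b.toNat

-- '256 - (256 >> (((x - 1) % 8) + 1 if x > 0 else 0))'
def octetoVal (x : Int) : Int :=
  256 - pyShr 256 (if x > 0 then PySem.Int.mod (x - 1) 8 + 1 else 0)

def ultimo_octeto_alt (lista_m : List Int) : List Int :=
  lista_m.filterMap (fun x => if 0 ≤ x ∧ x ≤ 32 then some (octetoVal x) else none)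

-- ===== PRECONDITION & SPEC =====
-- Pre_ excludes lists containing an element > 32: there A's second branch sums
-- pow(2, i) for negative i, so it returns a float, not a value of list[int].
def Pre_ultimo_octeto (lista_m : List Int) : Prop := ∀ x ∈ lista_m, x ≤ 32
instance (lista_m : List Int) : Decidable (Pre_ultimo_octeto lista_m) := by unfold Pre_ultimo_octeto; infer_instance
def pvWitness_ultimo_octeto : List Int := [0, 8, 9, 25, 32, -1]

def Spec_ultimo_octeto (lista_m : List Int) (out : List Int) : Prop := out = ultimo_octeto_alt lista_m
instance (lista_m : List Int) (out : List Int) : Decidable (Spec_ultimo_octeto lista_m out) := by unfold Spec_ultimo_octeto; infer_instance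

-- ===== CLAIM (what is proved, stated in full; the proofs are below) =====
def Claim_equal_ultimo_octeto : Prop := ∀ (lista_m : List Int), Dom_ultimo_octeto lista_m → Pre_ultimo_octeto lista_m → Spec_ultimo_octeto lista_m (ultimo_octeto lista_m)

-- ===== LEMMAS AND PROOFS =====
theorem octetoStep_append (acc : List Int) (x : Int) :
    octetoStep acc x = acc ++ octetoStep [] x := by
  unfold octetoStep; split_ifs <;> simp

theorem octetoStep_eq (x : Int) (hx : x ≤ 32) :
    octetoStep [] x =
      (if 0 ≤ x ∧ x ≤ 32 then some (octetoVal x) else none).toList := by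
  by_cases h0 : 0 ≤ x
  · interval_cases x <;> decide
  · have h0' : x < 0 := lt_of_not_ge h0
    unfold octetoStep
    rw [if_neg (by omega), if_neg (by omega), if_neg (by omega), if_neg (by omega),
        if_neg (by omega)]
    rfl

theorem fold_eq (l : List Int) (acc : List Int) (h : ∀ x ∈ l, x ≤ 32) :
    l.foldl octetoStep acc = acc ++ ultimo_octeto_alt l := by
  induction l generalizing acc with
  | nil => simp [ultimo_octeto_alt]
  | cons x xs ih =>
    have hx : x ≤ 32 := h x (by simp)
    have hxs : ∀ y ∈ xs, y ≤ 32 := fun y hy => h y (by simp [hy])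
    simp only [List.foldl_cons, ih _ hxs, octetoStep_append acc x,
      octetoStep_eq x hx, ultimo_octeto_alt, List.filterMap_cons]
    split <;> simp

-- ===== VERDICT (by name: the statement is the Claim_ definition above) =====
theorem ultimo_octeto_spec : Claim_equal_ultimo_octeto := by
  intro l _ hpre
  unfold Spec_ultimo_octeto ultimo_octeto
  simpa using fold_eq l [] hpre
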